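-- pv_equiv track=rewrite | github.com/RaulGarviCascos/problems | snakeApples.py | easyWay
-- ===== SOURCE A (Python) =====
-- def easyWay(sneakFinded,k,vector):
--     apples = 1
--     actualPos = 0 if sneakFinded == 0 else len(vector)-1
--     sum = abs(vector[actualPos])
--     while apples<k:
--         if sneakFinded == 0:
--             nextPos = actualPos+1
--             dif =  abs(-(vector[actualPos])+vector[nextPos])
--         else:
--             nextPos = actualPos-1
--             dif =  abs(-(vector[nextPos])+vector[actualPos])
--         sum+=dif
--         actualPos = nextPos
--         apples+=1
--     return sum
-- ===== SOURCE B (Python) =====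
-- def easyWay(sneakFinded, k, vector):
--     # resolve the walking direction once, then a single pairwise pass
--     path = vector if sneakFinded == 0 else vector[::-1]
--     vals = path[:max(k, 1)]
--     total = abs(vals[0])
--     for a, b in zip(vals, vals[1:]):
--         total += abs(b - a)
--     return total
-- ===== Notes on version B (the rewrite author's own statement) =====
-- stated objective: simpler
-- what changed: Instead of a stateful while-loop that branches on the direction at every iteration and walks explicit indices, B resolves the direction once (reversing for the backward case), slices the first max(k,1) visited values and sums abs of adjacent differences in one pairwise pass.
-- intended difference: On backward walks (sneakFinded != 0) with len(vector) < k <= 2*len(vector) whose wrapped-over steps are not all between equal elements, A's descending index goes negative and Python's negative-index wraparound silently re-eats elements from the front, so A returns an inflated double-counted sum; B stops at the vector's end and returns the pairwise sum over the actually available elements, which is the intended walk. — e.g. on easyWay(1, 3, [1, 2]): A returns 4, B returns 3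
import Mathlib
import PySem

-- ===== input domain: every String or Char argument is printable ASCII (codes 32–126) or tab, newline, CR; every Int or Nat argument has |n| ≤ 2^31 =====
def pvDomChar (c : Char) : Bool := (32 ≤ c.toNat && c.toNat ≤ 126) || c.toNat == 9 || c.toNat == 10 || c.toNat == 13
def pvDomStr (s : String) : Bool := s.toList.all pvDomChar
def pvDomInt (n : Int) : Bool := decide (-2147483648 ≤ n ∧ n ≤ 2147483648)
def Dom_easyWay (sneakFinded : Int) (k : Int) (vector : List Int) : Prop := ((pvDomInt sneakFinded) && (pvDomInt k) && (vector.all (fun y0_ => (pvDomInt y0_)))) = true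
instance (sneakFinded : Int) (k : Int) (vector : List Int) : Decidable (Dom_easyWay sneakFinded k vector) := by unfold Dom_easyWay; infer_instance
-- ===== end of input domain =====

-- B resolves the walking direction once and sums abs adjacent differences in one
-- pairwise pass (objective: simpler); equivalence is about the return value only.

-- ===== PORT A =====
-- the while-loop of A: fuel = remaining iterations k - apples; state (actualPos, sum)
def easyWayLoop (sneakFinded : Int) (vector : List Int) : Nat → Int → Int → Int
  | 0, _, s => s
  | fuel + 1, actualPos, s =>
    if sneakFinded == 0 then
      let nextPos := actualPos + 1
      let dif := |(-(PySem.List.pyGetD vector actualPos 0) + PySem.List.pyGetD vector nextPos 0)|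
      easyWayLoop sneakFinded vector fuel nextPos (s + dif)
    else
      let nextPos := actualPos - 1
      let dif := |(-(PySem.List.pyGetD vector nextPos 0) + PySem.List.pyGetD vector actualPos 0)|
      easyWayLoop sneakFinded vector fuel nextPos (s + dif)

def easyWay (sneakFinded : Int) (k : Int) (vector : List Int) : Int :=
  let actualPos : Int := if sneakFinded == 0 then 0 else (vector.length : Int) - 1
  let sum : Int := |PySem.List.pyGetD vector actualPos 0|
  easyWayLoop sneakFinded vector (k - 1).toNat actualPos sum

-- ===== PORT B =====
def easyWay_alt (sneakFinded : Int) (k : Int) (vector : List Int) : Int :=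
  let path := if sneakFinded == 0 then vector else vector.reverse
  let vals := PySem.List.slice path none (some (max k 1))
  let total : Int := |PySem.List.pyGetD vals 0 0|
  (vals.zip vals.tail).foldl (fun t p => t + |p.2 - p.1|) total

-- ===== PRECONDITION & SPEC =====
-- Pre_ excludes exactly the inputs where A raises IndexError: an empty vector, a
-- forward walk (sneakFinded == 0) with k > len, or a backward walk with k > 2*len
-- (Python's negative indexing keeps a backward walk alive until index -len-1).
def Pre_easyWay (sneakFinded : Int) (k : Int) (vector : List Int) : Prop :=
  vector ≠ [] ∧ ((sneakFinded = 0 ∧ k ≤ (vector.length : Int)) ∨ (sneakFinded ≠ 0 ∧ k ≤ 2 * (vector.length : Int)))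
instance (sneakFinded : Int) (k : Int) (vector : List Int) : Decidable (Pre_easyWay sneakFinded k vector) := by unfold Pre_easyWay; infer_instance
def pvWitness_easyWay : Int × Int × List Int := (0, 2, [3, -1])

-- On backward walks (sneakFinded != 0) with len(vector) < k <= 2*len(vector) whose wrapped-over
-- steps are not all between equal elements, A's descending index goes negative and Python's
-- negative-index wraparound silently re-eats elements from the front, so A returns an inflated
-- double-counted sum; B stops at the vector's end and returns the pairwise sum over the actually
-- available elements, which is the intended walk.
def D_easyWay (sneakFinded : Int) (k : Int) (vector : List Int) : Prop :=
  sneakFinded ≠ 0 ∧ vector ≠ [] ∧ (vector.length : Int) < k ∧ k ≤ 2 * (vector.length : Int) ∧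
    ∃ t ∈ List.range (k - (vector.length : Int)).toNat,
      PySem.List.pyGetD vector (-(t : Int)) 0 ≠ PySem.List.pyGetD vector (-(t : Int) - 1) 0
instance (sneakFinded : Int) (k : Int) (vector : List Int) : Decidable (D_easyWay sneakFinded k vector) := by unfold D_easyWay; infer_instance

def Spec_easyWay (sneakFinded : Int) (k : Int) (vector : List Int) (out : Int) : Prop := ¬ D_easyWay sneakFinded k vector → out = easyWay_alt sneakFinded k vector
instance (sneakFinded : Int) (k : Int) (vector : List Int) (out : Int) : Decidable (Spec_easyWay sneakFinded k vector out) := by unfold Spec_easyWay; infer_instance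
def pvDiffWitness_easyWay : Int × Int × List Int := (1, 3, [1, 2])
def pvDiffWitnessOut_easyWay : Int × Int := (4, 3)

-- ===== CLAIM =====
def Claim_unchanged_easyWay : Prop := ∀ (sneakFinded : Int) (k : Int) (vector : List Int), Dom_easyWay sneakFinded k vector → Pre_easyWay sneakFinded k vector → Spec_easyWay sneakFinded k vector (easyWay sneakFinded k vector)
def Claim_changed_easyWay : Prop := Dom_easyWay (pvDiffWitness_easyWay.1) (pvDiffWitness_easyWay.2.1) (pvDiffWitness_easyWay.2.2) ∧ Pre_easyWay (pvDiffWitness_easyWay.1) (pvDiffWitness_easyWay.2.1) (pvDiffWitness_easyWay.2.2) ∧ D_easyWay (pvDiffWitness_easyWay.1) (pvDiffWitness_easyWay.2.1) (pvDiffWitness_easyWay.2.2) ∧ easyWay (pvDiffWitness_easyWay.1) (pvDiffWitness_easyWay.2.1) (pvDiffWitness_easyWay.2.2) = pvDiffWitnessOut_easyWay.1 ∧ easyWay_alt (pvDiffWitness_easyWay.1) (pvDiffWitness_easyWay.2.1) (pvDiffWitness_easyWay.2.2) = pvDiffWitnessOut_easyWay.2 ∧ pvDiffWitnessOut_easyWay.1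 ≠ pvDiffWitnessOut_easyWay.2
def Claim_exact_easyWay : Prop := ∀ (sneakFinded : Int) (k : Int) (vector : List Int), Dom_easyWay sneakFinded k vector → Pre_easyWay sneakFinded k vector → D_easyWay sneakFinded k vector → easyWay sneakFinded k vector ≠ easyWay_alt sneakFinded k vector

-- ===== LEMMAS AND PROOFS =====

-- pairwise accumulator: what B's foldl over (vals, tail) computes, in recursive form
def pairAcc : List Int → Int → Int
  | a :: b :: t, s => pairAcc (b :: t) (s + |b - a|)
  | _, s => s

theorem foldl_zip_eq_pairAcc (l : List Int) (s : Int) :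
    (l.zip l.tail).foldl (fun t p => t + |p.2 - p.1|) s = pairAcc l s := by
  induction l generalizing s with
  | nil => simp [pairAcc]
  | cons a t ih =>
    cases t with
    | nil => simp [pairAcc]
    | cons b t' => simpa [List.zip, List.foldl, pairAcc] using ih (s + |b - a|)

theorem loop_forward (w : List Int) (f p : Nat) (s : Int) (h : p + f < w.length) :
    easyWayLoop 0 w f (p : Int) s = pairAcc ((w.drop p).take (f + 1)) s := by
  induction f generalizing p s with
  | zero =>
    have hp : p < w.length := by omega
    rw [List.drop_eq_getElem_cons hp, List.take_succ_cons, List.take_zero]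
    simp [easyWayLoop, pairAcc]
  | succ f ih =>
    have hp : p < w.length := by omega
    have hp1 : p + 1 < w.length := by omega
    have hcast : (p : Int) + 1 = ((p + 1 : Nat) : Int) := by push_cast; ring
    rw [show easyWayLoop 0 w (f + 1) (p : Int) s
        = easyWayLoop 0 w f ((p : Int) + 1)
            (s + |(-(PySem.List.pyGetD w (p : Int) 0) + PySem.List.pyGetD w ((p : Int) + 1) 0)|) from rfl]
    have g1 : PySem.List.pyGetD w (p : Int) 0 = w[p] := PySem.List.pyGetD_ofNat w p 0 hp
    have g2 : PySem.List.pyGetD w ((p : Int) + 1) 0 = w[p + 1] := by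
      rw [hcast]; exact PySem.List.pyGetD_ofNat w (p+1) 0 hp1
    rw [g1, g2, hcast, ih (p + 1) _ (by omega)]
    rw [List.drop_eq_getElem_cons hp, List.take_succ_cons,
        List.drop_eq_getElem_cons hp1, List.take_succ_cons]
    rw [neg_add_eq_sub]
    rfl

theorem loop_backward (sn : Int) (hs : (sn == 0) = false) (w : List Int) (f p : Nat)
    (hf : f ≤ p) (hp : p < w.length) (s : Int) :
    easyWayLoop sn w f (p : Int) s = easyWayLoop 0 w.reverse f ((w.length - 1 - p : Nat) : Int) s := by
  induction f generalizing p s with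
  | zero => simp [easyWayLoop]
  | succ f ih =>
    have hp1 : 1 ≤ p := by omega
    have hqr : w.length - 1 - p < w.reverse.length := by simp; omega
    have hq1r : w.length - 1 - p + 1 < w.reverse.length := by simp; omega
    have e1 : ((p : Int) - 1) = ((p - 1 : Nat) : Int) := by omega
    have hstep : easyWayLoop sn w (f + 1) (p : Int) s
        = easyWayLoop sn w f ((p : Int) - 1)
            (s + |(-(PySem.List.pyGetD w ((p : Int) - 1) 0) + PySem.List.pyGetD w (p : Int) 0)|) := by
      simp [easyWayLoop, hs]
    have hstepR : easyWayLoop 0 w.reverse (f + 1) ((w.length - 1 - p : Nat) : Int) s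
        = easyWayLoop 0 w.reverse f (((w.length - 1 - p : Nat) : Int) + 1)
            (s + |(-(PySem.List.pyGetD w.reverse ((w.length - 1 - p : Nat) : Int) 0)
                  + PySem.List.pyGetD w.reverse (((w.length - 1 - p : Nat) : Int) + 1) 0)|) := rfl
    have gA1 : PySem.List.pyGetD w ((p : Int) - 1) 0 = w[p - 1] := by
      rw [e1]; exact PySem.List.pyGetD_ofNat w (p - 1) 0 (by omega)
    have gA2 : PySem.List.pyGetD w (p : Int) 0 = w[p] := PySem.List.pyGetD_ofNat w p 0 hp
    have gB1 : PySem.List.pyGetD w.reverse ((w.length - 1 - p : Nat) : Int) 0 = w[p] := by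
      rw [PySem.List.pyGetD_ofNat w.reverse (w.length - 1 - p) 0 hqr, List.getElem_reverse]
      congr 1; omega
    have ecast : ((w.length - 1 - p : Nat) : Int) + 1 = ((w.length - 1 - p + 1 : Nat) : Int) := by omega
    have gB2 : PySem.List.pyGetD w.reverse (((w.length - 1 - p : Nat) : Int) + 1) 0 = w[p - 1] := by
      rw [ecast, PySem.List.pyGetD_ofNat w.reverse (w.length - 1 - p + 1) 0 hq1r, List.getElem_reverse]
      congr 1; omega
    rw [hstep, hstepR, gA1, gA2, gB1, gB2, e1, ih (p - 1) (by omega) (by omega)]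
    have : |(-w[p - 1] + w[p])| = |(-w[p] + w[p - 1])| := by
      rw [neg_add_eq_sub, neg_add_eq_sub, abs_sub_comm]
    rw [this]
    congr 1
    omega

theorem loop_step (sn : Int) (hs : (sn == 0) = false) (w : List Int) (f : Nat) (p s : Int) :
    easyWayLoop sn w (f + 1) p s
      = easyWayLoop sn w f (p - 1) (s + |(-(PySem.List.pyGetD w (p - 1) 0) + PySem.List.pyGetD w p 0)|) := by
  simp [easyWayLoop, hs]

theorem loop_split (sn : Int) (hs : (sn == 0) = false) (w : List Int) (f g : Nat) :
    ∀ (p s : Int), easyWayLoop sn w (f + g) p s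
      = easyWayLoop sn w g (p - (f : Int)) (easyWayLoop sn w f p s) := by
  induction f with
  | zero => intro p s; simp [easyWayLoop]
  | succ f ih =>
    intro p s
    rw [show f + 1 + g = (f + g) + 1 from by omega, loop_step sn hs w (f + g) p s,
        loop_step sn hs w f p s, ih (p - 1) _]
    congr 1
    push_cast
    ring

theorem loop_mono (sn : Int) (hs : (sn == 0) = false) (w : List Int) (f : Nat) :
    ∀ (p s : Int), s ≤ easyWayLoop sn w f p s := by
  induction f with
  | zero => intro p s; simp [easyWayLoop]
  | succ f ih =>
    intro p s
    rw [loop_step sn hs w f p s]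
    exact le_trans (le_add_of_nonneg_right (abs_nonneg _)) (ih _ _)

theorem loop_zero_extra (sn : Int) (hs : (sn == 0) = false) (w : List Int) (m : Nat) :
    ∀ (t : Nat) (s : Int),
      (∀ u : Nat, t ≤ u → u < t + m →
        PySem.List.pyGetD w (-(u : Int)) 0 = PySem.List.pyGetD w (-(u : Int) - 1) 0) →
      easyWayLoop sn w m (-(t : Int)) s = s := by
  induction m with
  | zero => intro t s _; simp [easyWayLoop]
  | succ m ih =>
    intro t s h
    rw [loop_step sn hs w m _ s,
        show (-(t : Int) - 1) = -(((t + 1 : Nat)) : Int) from by push_cast; ring]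
    have h0 : PySem.List.pyGetD w (-(t : Int)) 0 = PySem.List.pyGetD w (-((t + 1 : Nat) : Int)) 0 := by
      rw [h t le_rfl (by omega)]
      congr 1
      push_cast
      ring
    rw [h0, neg_add_cancel, abs_zero, add_zero]
    exact ih (t + 1) s (fun u h1 h2 => h u (by omega) (by omega))

theorem loop_strict (sn : Int) (hs : (sn == 0) = false) (w : List Int) (m : Nat) :
    ∀ (t : Nat) (s : Int),
      (∃ u : Nat, t ≤ u ∧ u < t + m ∧
        PySem.List.pyGetD w (-(u : Int)) 0 ≠ PySem.List.pyGetD w (-(u : Int) - 1) 0) →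
      s < easyWayLoop sn w m (-(t : Int)) s := by
  induction m with
  | zero => rintro t s ⟨u, h1, h2, -⟩; omega
  | succ m ih =>
    rintro t s ⟨u, h1, h2, hneq⟩
    rw [loop_step sn hs w m _ s,
        show (-(t : Int) - 1) = -(((t + 1 : Nat)) : Int) from by push_cast; ring]
    have eY : PySem.List.pyGetD w (-(t : Int) - 1) 0 = PySem.List.pyGetD w (-((t + 1 : Nat) : Int)) 0 := by
      congr 1
      push_cast
      ring
    by_cases hd : PySem.List.pyGetD w (-((t + 1 : Nat) : Int)) 0 = PySem.List.pyGetD w (-(t : Int)) 0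
    · have hut : u ≠ t := by
        rintro rfl
        rw [← eY] at hd
        exact hneq hd.symm
      rw [hd, neg_add_cancel, abs_zero, add_zero]
      exact ih (t + 1) s ⟨u, by omega, by omega, hneq⟩
    · refine lt_of_lt_of_le (lt_add_of_pos_right s (abs_pos.mpr ?_)) (loop_mono sn hs w m _ _)
      intro h0
      exact hd (by omega)

-- the inner (in-range) part of a backward walk equals the pairwise pass over the reversed prefix
theorem backward_eval (sn : Int) (hs : (sn == 0) = false) (v : List Int) (hne : v ≠ [])
    (f : Nat) (hf : f + 1 ≤ v.length) :
    easyWayLoop sn v f ((v.length : Int) - 1) (|PySem.List.pyGetD v ((v.length : Int) - 1) 0|)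
      = pairAcc (v.reverse.take (f + 1)) (|PySem.List.pyGetD (v.reverse.take (f + 1)) 0 0|) := by
  have hlen : 0 < v.length := List.length_pos_iff.mpr hne
  have e1 : ((v.length : Int) - 1) = ((v.length - 1 : Nat) : Int) := by omega
  rw [e1, loop_backward sn hs v f (v.length - 1) (by omega) (by omega)]
  have e2 : ((v.length - 1 - (v.length - 1) : Nat) : Int) = ((0 : Nat) : Int) := by omega
  rw [e2, loop_forward v.reverse f 0 _ (by simp; omega)]
  rw [List.drop_zero]
  have hrne : v.reverse ≠ [] := by simpa using hne
  have gL : PySem.List.pyGetD v ((v.length - 1 : Nat) : Int) 0 = v[v.length - 1]'(by omega) :=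
    PySem.List.pyGetD_ofNat v (v.length - 1) 0 (by omega)
  have gR : PySem.List.pyGetD (v.reverse.take (f + 1)) 0 0 = v[v.length - 1]'(by omega) := by
    -- head of the reversed prefix is the last element of v
    have h0 : 0 < v.reverse.length := by simpa using hlen
    obtain ⟨a, t, ht⟩ := List.exists_cons_of_ne_nil hrne
    have ha : a = v.reverse[0]'h0 := by simp [ht]
    rw [ht, List.take_succ_cons, PySem.List.pyGetD_zero_cons, ha, List.getElem_reverse]
    simp
  rw [gL, gR]

-- a backward walk longer than the vector = the full in-range walk (which is B's value)
-- followed by the wrapped-around extra steps starting at index 0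
theorem wrap_decomp (sn k : Int) (v : List Int) (hs : (sn == 0) = false) (hne : v ≠ [])
    (hlt : (v.length : Int) < k) :
    easyWay sn k v
      = easyWayLoop sn v ((k - (v.length : Int)).toNat) (-((0 : Nat) : Int)) (easyWay_alt sn k v) := by
  have hlen : 0 < v.length := List.length_pos_iff.mpr hne
  have hmax : max k 1 = (((k - 1).toNat + 1 : Nat) : Int) := by omega
  unfold easyWay easyWay_alt
  simp only [hs, Bool.false_eq_true, reduceIte]
  rw [hmax, PySem.List.slice_to_natCast, foldl_zip_eq_pairAcc]
  have htake : v.reverse.take ((k - 1).toNat + 1) = v.reverse :=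
    List.take_of_length_le (by simp; omega)
  rw [htake, show (k - 1).toNat = (v.length - 1) + (k - (v.length : Int)).toNat from by omega,
      loop_split sn hs v (v.length - 1) ((k - (v.length : Int)).toNat) ((v.length : Int) - 1) _]
  rw [show ((v.length : Int) - 1) - ((v.length - 1 : Nat) : Int) = -((0 : Nat) : Int) from by push_cast; omega]
  have hin := backward_eval sn hs v hne (v.length - 1) (by omega)
  have etake : v.reverse.take (v.length - 1 + 1) = v.reverse := by
    rw [show v.length - 1 + 1 = v.length from by omega]
    exact List.take_of_length_le (by simp)
  rw [etake] at hin
  rw [hin]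

-- ===== VERDICT =====
theorem easyWay_spec : Claim_unchanged_easyWay := by
  intro sn k v _ hpre hnd
  obtain ⟨hne, hdir⟩ := hpre
  have hlen : 0 < v.length := List.length_pos_iff.mpr hne
  cases hsn : (sn == 0) with
  | true =>
    have h0 : sn = 0 := by simpa using hsn
    subst h0
    have hk : k ≤ (v.length : Int) := by
      rcases hdir with ⟨-, hk⟩ | ⟨hne0, -⟩
      · exact hk
      · exact absurd rfl hne0
    have hmax : max k 1 = (((k - 1).toNat + 1 : Nat) : Int) := by omega
    unfold easyWay easyWay_alt
    rw [hmax]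
    simp only [hsn, reduceIte]
    rw [PySem.List.slice_to_natCast, foldl_zip_eq_pairAcc]
    have LF := loop_forward v ((k - 1).toNat) 0 (|PySem.List.pyGetD v 0 0|) (by omega)
    simp only [Nat.cast_zero, List.drop_zero] at LF
    rw [LF]
    obtain ⟨a, t, rfl⟩ := List.exists_cons_of_ne_nil hne
    simp [PySem.List.pyGetD_zero, List.take_succ_cons]
  | false =>
    have hne0 : sn ≠ 0 := by
      intro h
      rw [h] at hsn
      simp at hsn
    by_cases hk : k ≤ (v.length : Int)
    · have hmax : max k 1 = (((k - 1).toNat + 1 : Nat) : Int) := by omega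
      unfold easyWay easyWay_alt
      rw [hmax]
      simp only [hsn, Bool.false_eq_true, reduceIte]
      rw [PySem.List.slice_to_natCast, foldl_zip_eq_pairAcc]
      exact backward_eval sn hsn v hne ((k - 1).toNat) (by omega)
    · have hk2 : k ≤ 2 * (v.length : Int) := by
        rcases hdir with ⟨h0, -⟩ | ⟨-, h2⟩
        · exact absurd h0 hne0
        · exact h2
      have hall : ∀ t ∈ List.range (k - (v.length : Int)).toNat,
          PySem.List.pyGetD v (-(t : Int)) 0 = PySem.List.pyGetD v (-(t : Int) - 1) 0 := by
        intro t ht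
        by_contra hneq
        exact hnd ⟨hne0, hne, by omega, hk2, t, ht, hneq⟩
      rw [wrap_decomp sn k v hsn hne (by omega)]
      exact loop_zero_extra sn hsn v ((k - (v.length : Int)).toNat) 0 _
        (fun u h1 h2 => hall u (List.mem_range.mpr (by omega)))

theorem easyWay_changed : Claim_changed_easyWay := by
  unfold Claim_changed_easyWay; decide

theorem easyWay_tight : Claim_exact_easyWay := by
  intro sn k v _ hpre hd
  obtain ⟨hne0, hne, hlt, hk2, t0, ht0, htne⟩ := hd
  have hs : (sn == 0) = false := by
    rw [beq_eq_false_iff_ne]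
    exact hne0
  rw [wrap_decomp sn k v hs hne hlt]
  exact (loop_strict sn hs v ((k - (v.length : Int)).toNat) 0 _
    ⟨t0, by omega, by have := List.mem_range.mp ht0; omega, htne⟩).ne'
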